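-- pv_equiv track=rewrite | github.com/Apillicus/Python-scripts | simple_ciphers.py | grade_message
-- ===== SOURCE A (Python) =====
-- def grade_message(plaintext,known_words):
--     # TODO: Implement function
--
--     # from plaintext, find matches from known_words list
--     # exclude bad matches, return a numer of matches
--
--     list_matches = 0
--
--     for word in plaintext.split():
--         for words in known_words:
--             if word.upper() == words.upper():
--                 list_matches += 1
--             else:
--                 pass
--     return list_matches
-- ===== SOURCE B (Python) =====
-- def grade_message(plaintext, known_words):
--     # Build one frequency table of uppercased known words, then a single pass
--     # over the plaintext words adds the count of each word's matches.
--     kc = {}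
--     for w in known_words:
--         u = w.upper()
--         kc[u] = kc.get(u, 0) + 1
--     total = 0
--     for word in plaintext.split():
--         total += kc.get(word.upper(), 0)
--     return total
-- ===== Notes on version B (the rewrite author's own statement) =====
-- stated objective: faster
-- what changed: Replaces the nested per-word scan of known_words by a frequency table of uppercased known words built once, then a single pass over the plaintext words summing table lookups.
import Mathlib
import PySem

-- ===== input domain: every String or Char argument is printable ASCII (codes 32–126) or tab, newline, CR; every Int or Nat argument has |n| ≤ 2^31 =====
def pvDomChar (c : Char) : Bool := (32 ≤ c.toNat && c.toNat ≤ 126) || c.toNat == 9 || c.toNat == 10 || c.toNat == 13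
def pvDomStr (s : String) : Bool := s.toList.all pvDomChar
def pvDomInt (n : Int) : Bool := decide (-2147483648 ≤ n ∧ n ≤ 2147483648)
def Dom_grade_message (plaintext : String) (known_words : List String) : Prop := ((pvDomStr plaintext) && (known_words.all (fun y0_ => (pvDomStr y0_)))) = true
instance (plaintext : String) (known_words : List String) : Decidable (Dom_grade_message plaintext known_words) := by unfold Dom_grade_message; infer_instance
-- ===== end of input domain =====

-- B replaces A's nested scan of known_words per plaintext word by a frequency table of uppercased known words built once plus one summing pass (objective: faster).


-- ===== PORT A =====
-- Nested loops: for each whitespace word of plaintext, scan known_words, counting case-insensitive matches.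
def grade_message (plaintext : String) (known_words : List String) : Int :=
  (PySem.Str.split₀ plaintext).foldl (fun list_matches word =>
    known_words.foldl (fun lm words =>
      if PySem.Str.upper word = PySem.Str.upper words then lm + 1 else lm) list_matches) 0

-- ===== PORT B =====
-- B: one frequency table of uppercased known words, then one pass over plaintext words summing lookups.
def grade_message_alt (plaintext : String) (known_words : List String) : Int :=
  let kc : PySem.Dict String Int :=
    known_words.foldl (fun d w => d.insert (PySem.Str.upper w) (d.getD (PySem.Str.upper w) 0 + 1)) PySem.Dict.empty
  (PySem.Str.split₀ plaintext).foldl (fun total word => total + kc.getD (PySem.Str.upper word) 0) 0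

-- ===== PRECONDITION & SPEC =====
def Spec_grade_message (plaintext : String) (known_words : List String) (out : Int) : Prop := out = grade_message_alt plaintext known_words
instance (plaintext : String) (known_words : List String) (out : Int) : Decidable (Spec_grade_message plaintext known_words out) := by unfold Spec_grade_message; infer_instance

-- ===== CLAIM (what is proved, stated in full; the proofs are below) =====
def Claim_equal_grade_message : Prop := ∀ (plaintext : String) (known_words : List String), Dom_grade_message plaintext known_words → Spec_grade_message plaintext known_words (grade_message plaintext known_words)

-- ===== LEMMAS AND PROOFS =====

-- ===== VERDICT (by name: the statement is the Claim_ definition above) =====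
lemma inner_count (word : String) (ks : List String) (acc : Int) :
    ks.foldl (fun lm words => if PySem.Str.upper word = PySem.Str.upper words then lm + 1 else lm) acc
      = acc + ((ks.map PySem.Str.upper).count (PySem.Str.upper word) : Int) := by
  induction ks generalizing acc with
  | nil => simp
  | cons k ks ih =>
    simp only [List.foldl_cons, List.map_cons, List.count_cons, ih]
    by_cases h : PySem.Str.upper word = PySem.Str.upper k
    · simp [h]; ring
    · simp [h, Ne.symm h]

lemma kc_getD (known_words : List String) (u : String) :
    (known_words.foldl (fun d w => d.insert (PySem.Str.upper w) (d.getD (PySem.Str.upper w) 0 + 1))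
      (PySem.Dict.empty : PySem.Dict String Int)).getD u 0
      = ((known_words.map PySem.Str.upper).count u : Int) := by
  rw [← List.foldl_map (f := PySem.Str.upper)
        (g := fun d u => PySem.Dict.insert d u (PySem.Dict.getD d u 0 + 1))]
  rw [PySem.Dict.getD_foldl_insert_add_one]
  simp [PySem.Dict.getD_empty]

theorem grade_message_spec : Claim_equal_grade_message := by
  intro plaintext known_words _
  show grade_message plaintext known_words = grade_message_alt plaintext known_words
  unfold grade_message grade_message_alt
  simp only []
  exact PySem.List.foldl_congr_mem _ _ _ _ (fun acc word _ => by rw [inner_count, kc_getD])
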